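-- pv_equiv track=rewrite | github.com/ACBAD/web-utils | app.py | filterOutseaProxies
-- ===== SOURCE A (Python) =====
-- def filterOutseaProxies(lst):
--     """Keep elements after the second string containing '-'."""
--     count = 0
--     for i, element in enumerate(lst):
--         if '-' in element:
--             count += 1
--         if count == 2:
--             return lst[i:]
--     return []
-- ===== SOURCE B (Python) =====
-- def filterOutseaProxies(lst):
--     """Keep elements after the second string containing '-'."""
--     lo = hi = None  # leftmost and second-leftmost dash indices seen so far
--     for i in range(len(lst) - 1, -1, -1):
--         if '-' in lst[i]:
--             lo, hi = i, lo
--     return lst[hi:] if hi is not None else []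
-- ===== Notes on version B (the rewrite author's own statement) =====
-- stated objective: alternative
-- what changed: B scans the list BACKWARDS over range(len-1,-1,-1), maintaining the two leftmost dash indices seen so far, and slices at the second one at the end, instead of A's forward counter loop with early return.
import Mathlib
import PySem

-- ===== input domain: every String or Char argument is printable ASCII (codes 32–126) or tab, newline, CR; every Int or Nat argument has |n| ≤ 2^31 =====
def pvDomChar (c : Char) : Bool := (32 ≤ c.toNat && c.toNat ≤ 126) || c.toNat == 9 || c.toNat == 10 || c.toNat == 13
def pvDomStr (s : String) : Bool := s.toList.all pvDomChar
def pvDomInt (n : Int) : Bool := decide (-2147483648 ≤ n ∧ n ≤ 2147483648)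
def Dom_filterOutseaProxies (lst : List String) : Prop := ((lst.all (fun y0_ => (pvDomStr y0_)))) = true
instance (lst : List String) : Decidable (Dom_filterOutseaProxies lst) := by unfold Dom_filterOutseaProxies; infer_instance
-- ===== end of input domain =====

-- B scans backwards tracking the two leftmost dash indices, then slices once at the end;
-- same return value as A's forward early-exit counter loop, no speed claim.

-- ===== PORT A =====
-- A's for-loop with early return: structural recursion over the remaining list,
-- carrying the enumerate index i and the dash counter.
def filterOutseaProxiesGo (lst rest : List String) (i : Nat) (count : Nat) : List String :=
  match rest with
  | [] => []
  | e :: rs =>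
    let count' := if PySem.Str.isIn "-" e then count + 1 else count
    if count' = 2 then PySem.List.slice lst (some (i : Int)) none
    else filterOutseaProxiesGo lst rs (i + 1) count'

def filterOutseaProxies (lst : List String) : List String :=
  filterOutseaProxiesGo lst lst 0 0

-- ===== PORT B =====
-- lo = hi = None; for i in range(len(lst)-1, -1, -1): if '-' in lst[i]: lo, hi = i, lo
-- return lst[hi:] if hi is not None else []
-- (lst[i] inside the loop is always in range; ported with pyGetD, exact there)
def filterOutseaProxies_alt (lst : List String) : List String :=
  let st := (PySem.List.pyRange ((lst.length : Int) - 1) (-1) (-1)).foldl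
    (fun (st : Option Int × Option Int) i =>
      if PySem.Str.isIn "-" (PySem.List.pyGetD lst i "") then (some i, st.1) else st)
    (none, none)
  match st.2 with
  | some j => PySem.List.slice lst (some j) none
  | none => []

-- ===== PRECONDITION & SPEC =====
def Spec_filterOutseaProxies (lst : List String) (out : List String) : Prop := out = filterOutseaProxies_alt lst
instance (lst : List String) (out : List String) : Decidable (Spec_filterOutseaProxies lst out) := by unfold Spec_filterOutseaProxies; infer_instance

-- ===== CLAIM (what is proved, stated in full; the proofs are below) =====
def Claim_equal_filterOutseaProxies : Prop := ∀ (lst : List String), Dom_filterOutseaProxies lst → Spec_filterOutseaProxies lst (filterOutseaProxies lst)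

-- ===== LEMMAS AND PROOFS =====

-- Suffix starting at the FIRST dash-containing element ([] if none).
def pvFirstDrop : List String → List String
  | [] => []
  | e :: rs => if PySem.Str.isIn "-" e then e :: rs else pvFirstDrop rs

-- Suffix starting at the SECOND dash-containing element ([] if fewer than two).
def pvSecondDrop : List String → List String
  | [] => []
  | e :: rs => if PySem.Str.isIn "-" e then pvFirstDrop rs else pvSecondDrop rs

-- Indices (within the list itself) of dash-containing elements.
def pvDashIdx : List String → List Nat
  | [] => []
  | e :: rs =>
    if PySem.Str.isIn "-" e then 0 :: (pvDashIdx rs).map (· + 1)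
    else (pvDashIdx rs).map (· + 1)

-- The backward fold, rewritten as a front-to-back recursion carrying the offset k:
-- state after processing the indices of `rest` (which sits at offset k in lst).
def pvF : List String → Int → Option Int × Option Int
  | [], _ => (none, none)
  | e :: rs, k =>
    let st := pvF rs (k + 1)
    if PySem.Str.isIn "-" e then (some k, st.1) else st

lemma pvDashIdx_drop (lst : List String) :
    (match pvDashIdx lst with
     | [] => pvFirstDrop lst = [] ∧ pvSecondDrop lst = []
     | [k] => lst.drop k = pvFirstDrop lst ∧ pvSecondDrop lst = []
     | k :: j :: _ => lst.drop k = pvFirstDrop lst ∧ lst.drop j = pvSecondDrop lst) := by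
  induction lst with
  | nil => simp [pvDashIdx, pvFirstDrop, pvSecondDrop]
  | cons e rs ih =>
    by_cases h : PySem.Str.isIn "-" e
    · simp only [pvDashIdx, pvFirstDrop, pvSecondDrop, h, if_pos]
      cases hr : pvDashIdx rs with
      | nil => simp [hr] at ih; simp [ih]
      | cons k ks =>
        cases ks with
        | nil => simp [hr] at ih; simp [List.drop_succ_cons, ih]
        | cons j js => simp [hr] at ih; simp [List.drop_succ_cons, ih]
    · simp only [pvDashIdx, pvFirstDrop, pvSecondDrop, h, if_neg, Bool.false_eq_true,
        not_false_iff]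
      cases hr : pvDashIdx rs with
      | nil => simp [hr] at ih; simp [ih]
      | cons k ks =>
        cases ks with
        | nil => simp [hr] at ih; simp [List.drop_succ_cons, ih]
        | cons j js => simp [hr] at ih; simp [List.drop_succ_cons, ih]

-- pvF computes the first two dash indices (offset by k).
lemma pvF_eq_dashIdx (rest : List String) (k : Int) :
    pvF rest k = ((pvDashIdx rest).head?.map (fun j : Nat => k + (j : Int)),
                  (pvDashIdx rest)[1]?.map (fun j : Nat => k + (j : Int))) := by
  induction rest generalizing k with
  | nil => simp [pvF, pvDashIdx]
  | cons e rs ih =>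
    by_cases h : PySem.Str.isIn "-" e
    · simp only [pvF, pvDashIdx, h, if_pos, ih (k + 1)]
      cases hr : pvDashIdx rs with
      | nil => simp
      | cons a as => simp; ring
    · simp only [pvF, pvDashIdx, h, Bool.false_eq_true, if_neg, not_false_iff, ih (k + 1)]
      cases hr : pvDashIdx rs with
      | nil => simp
      | cons a as =>
        cases as with
        | nil => simp; ring
        | cons b bs =>
          simp only [List.map_cons, List.head?_cons, Option.map_some,
            List.getElem?_cons_succ, List.getElem?_cons_zero]
          simp only [Prod.mk.injEq, Option.some.injEq]
          constructor <;> (push_cast; ring)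

-- The backward foldl over range(len-1, -1, -1) is the forward foldr over range(k, len, 1),
-- which is pvF on the suffix at k.
lemma pvFoldr_eq_pvF (lst : List String) :
    ∀ (rest : List String) (k : Nat), lst.drop k = rest →
    (PySem.List.pyRange (k : Int) (lst.length : Int) 1).foldr
      (fun i st => if PySem.Str.isIn "-" (PySem.List.pyGetD lst i "") then (some i, st.1) else st)
      ((none : Option Int), (none : Option Int))
    = pvF rest (k : Int) := by
  intro rest
  induction rest with
  | nil =>
    intro k h
    have hk : lst.length ≤ k := by
      by_contra hlt
      have := List.drop_eq_nil_iff.mp h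
      omega
    rw [PySem.List.pyRange_one_eq_nil (by exact_mod_cast hk)]
    simp [pvF]
  | cons e rs ih =>
    intro k h
    have hk : k < lst.length := by
      by_contra hge
      rw [List.drop_eq_nil_iff.mpr (by omega)] at h
      simp at h
    have h' : lst.drop (k + 1) = rs := by
      have := congrArg List.tail h
      simpa [List.tail_drop] using this
    have he : PySem.List.pyGetD lst (k : Int) "" = e := by
      rw [PySem.List.pyGetD_natCast]
      have : lst.getD k "" = (lst.drop k).getD 0 "" := by
        simp [List.getD, List.getElem?_drop]
      rw [this, h]; rfl
    rw [PySem.List.pyRange_one_cons (by exact_mod_cast hk), List.foldr_cons]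
    have : ((k : Int) + 1) = ((k + 1 : Nat) : Int) := by push_cast; ring
    rw [this, ih (k + 1) h', he]
    simp [pvF]

-- B's fold equals pvF lst 0, hence its result is pvSecondDrop.
lemma pvAlt_eq_secondDrop (lst : List String) :
    filterOutseaProxies_alt lst = pvSecondDrop lst := by
  unfold filterOutseaProxies_alt
  rw [PySem.List.pyRange_neg_one_eq_reverse, List.foldl_reverse]
  have h0 : ((-1 : Int) + 1) = ((0 : Nat) : Int) := by norm_num
  have h1 : ((lst.length : Int) - 1 + 1) = (lst.length : Int) := by ring
  rw [h0, h1, pvFoldr_eq_pvF lst lst 0 (by simp), pvF_eq_dashIdx]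
  have key := pvDashIdx_drop lst
  cases hr : pvDashIdx lst with
  | nil => simp [hr] at key ⊢; simp [key]
  | cons a as =>
    cases as with
    | nil => simp [hr] at key ⊢; simp [key]
    | cons b bs =>
      simp [hr] at key
      simp only [List.getElem?_cons_succ, List.getElem?_cons_zero, Option.map_some]
      simp [PySem.List.slice_from_natCast, key]

lemma pvGo_eq (rest lst : List String) (i : Nat) (h : lst.drop i = rest) :
    filterOutseaProxiesGo lst rest i 1 = pvFirstDrop rest ∧
    filterOutseaProxiesGo lst rest i 0 = pvSecondDrop rest := by
  induction rest generalizing i with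
  | nil => simp [filterOutseaProxiesGo, pvFirstDrop, pvSecondDrop]
  | cons e rs ih =>
    have h' : lst.drop (i + 1) = rs := by
      have := congrArg List.tail h
      simpa [List.tail_drop] using this
    have IH := ih (i + 1) h'
    by_cases hd : PySem.Chars.isIn ['-'] e.toList = true
    · refine ⟨?_, ?_⟩
      · simp [filterOutseaProxiesGo, hd, pvFirstDrop, PySem.List.slice_from_natCast, h]
      · simp [filterOutseaProxiesGo, hd, pvSecondDrop, IH.1]
    · refine ⟨?_, ?_⟩
      · simp [filterOutseaProxiesGo, hd, pvFirstDrop, IH.1]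
      · simp [filterOutseaProxiesGo, hd, pvSecondDrop, IH.2]

-- ===== VERDICT (by name: the statement is the Claim_ definition above) =====
theorem filterOutseaProxies_spec : Claim_equal_filterOutseaProxies := by
  intro lst _
  unfold Spec_filterOutseaProxies filterOutseaProxies
  rw [pvAlt_eq_secondDrop, (pvGo_eq lst lst 0 (by simp)).2]
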